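-- pv_equiv track=rewrite | github.com/Stoff73/insig_demo-multiple-financials | backend/backup_old_converters/pdf_converter_v2.py | _combine_header_rows
-- ===== SOURCE A (Python) =====
-- from typing import List, Dict, Any, Optional, Tuple
--
-- def _combine_header_rows(header_rows: List[List[str]]) -> List[str]:
--     """Combine multiple header rows into one"""
--     if not header_rows:
--         return []
--
--     combined = []
--     max_cols = max(len(row) for row in header_rows)
--
--     for col_idx in range(max_cols):
--         col_parts = []
--         for row in header_rows:
--             if col_idx < len(row) and row[col_idx]:
--                 col_parts.append(row[col_idx])
--
--         combined.append(' '.join(col_parts))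
--
--     return combined
-- ===== SOURCE B (Python) =====
-- def _combine_header_rows(header_rows):
--     """Combine multiple header rows into one"""
--     if not header_rows:
--         return []
--
--     cols = {}
--     for row in header_rows:
--         for i, cell in enumerate(row):
--             if cell:
--                 cols.setdefault(i, []).append(cell)
--
--     max_cols = max(len(row) for row in header_rows)
--     return [' '.join(cols.get(i, [])) for i in range(max_cols)]
-- ===== Notes on version B (the rewrite author's own statement) =====
-- stated objective: alternative
-- what changed: Replaces A's column-major nested scan (for each column index, rescan every row) by a single row-major pass that groups non-empty cells into a dict keyed by column index, followed by one join per column.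
import Mathlib
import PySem

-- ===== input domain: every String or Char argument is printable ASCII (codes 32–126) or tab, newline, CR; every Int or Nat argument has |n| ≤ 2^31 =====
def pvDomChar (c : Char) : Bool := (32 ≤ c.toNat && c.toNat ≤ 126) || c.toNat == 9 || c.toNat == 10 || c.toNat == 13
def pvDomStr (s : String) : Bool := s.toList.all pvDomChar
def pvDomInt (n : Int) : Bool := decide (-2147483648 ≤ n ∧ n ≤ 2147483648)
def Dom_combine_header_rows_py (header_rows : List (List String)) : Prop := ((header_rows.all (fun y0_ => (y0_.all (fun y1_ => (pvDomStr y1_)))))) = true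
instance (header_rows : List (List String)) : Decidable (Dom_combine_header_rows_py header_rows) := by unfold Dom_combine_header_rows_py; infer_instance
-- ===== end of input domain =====

-- B replaces A's column-major rescan of every row per column by one row-major pass that
-- groups non-empty cells into a dict keyed by column index (objective: alternative).

-- ===== PORT A =====
def combine_header_rows_py (header_rows : List (List String)) : List String :=
  if header_rows = [] then []
  else
    -- max_cols = max(len(row) for row in header_rows)  (header_rows nonempty here)
    (PySem.List.pyRange 0
        (match header_rows.map (fun row => (row.length : Int)) with
         | [] => 0
         | x :: xs => xs.foldl max x) 1).foldl
      (fun combined col_idx =>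
        combined ++ [PySem.Str.join " "
          (header_rows.foldl
            (fun ps row =>
              if col_idx < (row.length : Int) ∧ PySem.List.pyGetD row col_idx "" ≠ "" then
                ps ++ [PySem.List.pyGetD row col_idx ""]
              else ps) [])]) []

-- ===== PORT B =====
-- Source B's 'cols' dict: for each row, for i, cell in enumerate(row): if cell: cols.setdefault(i, []).append(cell)
def pvColsB (header_rows : List (List String)) : PySem.Dict Int (List String) :=
  header_rows.foldl
    (fun d row =>
      (PySem.List.enumerate row 0).foldl
        (fun d p => if p.2 ≠ "" then d.modify p.1 [] (· ++ [p.2]) else d) d)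
    PySem.Dict.empty

def combine_header_rows_py_alt (header_rows : List (List String)) : List String :=
  if header_rows = [] then []
  else
    (PySem.List.pyRange 0
        (match header_rows.map (fun row => (row.length : Int)) with
         | [] => 0
         | x :: xs => xs.foldl max x) 1).map
      (fun i => PySem.Str.join " " ((pvColsB header_rows).getD i []))

-- ===== PRECONDITION & SPEC =====
def Spec_combine_header_rows_py (header_rows : List (List String)) (out : List String) : Prop := out = combine_header_rows_py_alt header_rows
instance (header_rows : List (List String)) (out : List String) : Decidable (Spec_combine_header_rows_py header_rows out) := by unfold Spec_combine_header_rows_py; infer_instance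

-- ===== CLAIM (what is proved, stated in full; the proofs are below) =====
def Claim_equal_combine_header_rows_py : Prop := ∀ (header_rows : List (List String)), Dom_combine_header_rows_py header_rows → Spec_combine_header_rows_py header_rows (combine_header_rows_py header_rows)

-- ===== LEMMAS AND PROOFS =====

-- the contribution of one row to column t: its cell there, if present and non-empty
def pvCell (row : List String) (t : Int) : List String :=
  if 0 ≤ t ∧ t < (row.length : Int) ∧ row.getD t.toNat "" ≠ "" then [row.getD t.toNat ""] else []

theorem pvCell_neg (row : List String) (t : Int) (h : t < 0) : pvCell row t = [] := by
  unfold pvCell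
  exact if_neg (by rintro ⟨h1, _, _⟩; omega)

theorem pvCell_cons_zero (x : String) (xs : List String) :
    pvCell (x :: xs) 0 = if x = "" then [] else [x] := by
  unfold pvCell
  by_cases hx : x = ""
  · rw [if_pos hx, if_neg (by rintro ⟨_, _, h3⟩; rw [Int.toNat_zero, List.getD_cons_zero] at h3; exact h3 hx)]
  · rw [if_neg hx, if_pos ⟨by omega, by exact_mod_cast Nat.succ_pos xs.length,
        by rw [Int.toNat_zero, List.getD_cons_zero]; exact hx⟩]
    rw [Int.toNat_zero, List.getD_cons_zero]

theorem pvCell_cons_succ (x : String) (xs : List String) (t : Int) (h : 0 < t) :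
    pvCell (x :: xs) t = pvCell xs (t - 1) := by
  unfold pvCell
  have ht : t.toNat = (t - 1).toNat + 1 := by omega
  rw [ht, List.getD_cons_succ]
  refine if_congr ?_ rfl rfl
  constructor
  · rintro ⟨a, b, c⟩; exact ⟨by omega, by push_cast [List.length_cons] at b ⊢; omega, c⟩
  · rintro ⟨a, b, c⟩; exact ⟨by omega, by push_cast [List.length_cons] at b ⊢; omega, c⟩

theorem pvInnerFold (row : List String) : ∀ (s j : Int) (d : PySem.Dict Int (List String)),
    ((PySem.List.enumerate row s).foldl
      (fun d p => if p.2 ≠ "" then d.modify p.1 [] (· ++ [p.2]) else d) d).getD j [] =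
    d.getD j [] ++ pvCell row (j - s) := by
  induction row with
  | nil =>
    intro s j d
    rw [PySem.List.enumerate_nil, List.foldl_nil]
    unfold pvCell
    rw [if_neg (by rintro ⟨h1, h2, _⟩; simp at h2; omega)]
    simp
  | cons x xs ih =>
    intro s j d
    rw [PySem.List.enumerate_cons, List.foldl_cons]
    simp only []
    by_cases hx : x = ""
    · rw [if_neg (by simp [hx]), ih (s + 1) j d]
      congr 1
      by_cases hjs : j = s
      · subst hjs
        rw [show j - (j + 1) = -1 by omega, pvCell_neg _ _ (by omega),
            show j - j = (0 : Int) by omega, pvCell_cons_zero, if_pos hx]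
      · by_cases hlt : s < j
        · rw [pvCell_cons_succ x xs (j - s) (by omega), show j - (s + 1) = j - s - 1 by omega]
        · rw [pvCell_neg _ _ (by omega), pvCell_neg _ _ (by omega)]
    · rw [if_pos hx, ih (s + 1) j, PySem.Dict.getD_modify]
      by_cases hjs : j = s
      · subst hjs
        rw [if_pos rfl, show j - (j + 1) = -1 by omega, pvCell_neg _ _ (by omega),
            show j - j = (0 : Int) by omega, pvCell_cons_zero, if_neg hx]
        simp
      · rw [if_neg hjs]
        congr 1
        by_cases hlt : s < j
        · rw [pvCell_cons_succ x xs (j - s) (by omega), show j - (s + 1) = j - s - 1 by omega]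
        · rw [pvCell_neg _ _ (by omega), pvCell_neg _ _ (by omega)]

-- the cells contributed to column j, in row order
def pvParts (hr : List (List String)) (j : Int) : List String :=
  hr.flatMap (fun row => pvCell row j)

theorem pvOuterFold (hr : List (List String)) : ∀ (d : PySem.Dict Int (List String)) (j : Int),
    (hr.foldl
      (fun d row =>
        (PySem.List.enumerate row 0).foldl
          (fun d p => if p.2 ≠ "" then d.modify p.1 [] (· ++ [p.2]) else d) d) d).getD j [] =
    d.getD j [] ++ pvParts hr j := by
  induction hr with
  | nil =>
    intro d j
    rw [List.foldl_nil]
    unfold pvParts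
    rw [List.flatMap_nil, List.append_nil]
  | cons row rows ih =>
    intro d j
    rw [List.foldl_cons]
    rw [ih, pvInnerFold row 0 j d]
    unfold pvParts
    rw [List.flatMap_cons, show j - 0 = j by omega, List.append_assoc]

theorem pvColsB_getD (hr : List (List String)) (j : Int) :
    (pvColsB hr).getD j [] = pvParts hr j := by
  unfold pvColsB
  rw [pvOuterFold, PySem.Dict.getD_empty, List.nil_append]

theorem pvPartsA (hr : List (List String)) (j : Int) (hj : 0 ≤ j) : ∀ (acc : List String),
    hr.foldl
      (fun ps row =>
        if j < (row.length : Int) ∧ PySem.List.pyGetD row j "" ≠ "" then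
          ps ++ [PySem.List.pyGetD row j ""]
        else ps) acc = acc ++ pvParts hr j := by
  induction hr with
  | nil =>
    intro acc
    rw [List.foldl_nil]
    unfold pvParts
    rw [List.flatMap_nil, List.append_nil]
  | cons row rows ih =>
    intro acc
    rw [List.foldl_cons]
    rw [ih]
    unfold pvParts
    rw [List.flatMap_cons, PySem.List.pyGetD_of_nonneg row "" hj]
    unfold pvCell
    by_cases hc : j < (row.length : Int) ∧ row.getD j.toNat "" ≠ ""
    · rw [if_pos hc, if_pos ⟨hj, hc.1, hc.2⟩, List.append_assoc]
    · rw [if_neg hc, if_neg (by rintro ⟨_, b, c⟩; exact hc ⟨b, c⟩)]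
      simp

-- ===== VERDICT (by name: the statement is the Claim_ definition above) =====
theorem combine_header_rows_py_spec : Claim_equal_combine_header_rows_py := by
  intro hr _
  unfold Spec_combine_header_rows_py combine_header_rows_py combine_header_rows_py_alt
  by_cases h : hr = []
  · rw [if_pos h, if_pos h]
  · rw [if_neg h, if_neg h,
      PySem.List.foldl_append_singleton_eq_map
        (f := fun col_idx => PySem.Str.join " "
          (hr.foldl
            (fun ps row =>
              if col_idx < (row.length : Int) ∧ PySem.List.pyGetD row col_idx "" ≠ "" then
                ps ++ [PySem.List.pyGetD row col_idx ""]
              else ps) [])),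
      List.nil_append]
    refine List.map_congr_left ?_
    intro j hj
    have hj0 : 0 ≤ j := (PySem.List.mem_pyRange_one.mp hj).1
    rw [pvPartsA hr j hj0 [], List.nil_append, pvColsB_getD]
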